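-- pv_equiv track=rewrite | github.com/Stepan2222000/avito-library | avito_library/debug/screenshot.py | _sanitize_fragment
-- ===== SOURCE A (Python) =====
-- def _sanitize_fragment(fragment: str | None) -> str | None:
--     if not fragment:
--         return None
--     cleaned = []
--     for char in fragment.lower():
--         if char.isalnum() or char in {"-", "_"}:
--             cleaned.append(char)
--         else:
--             cleaned.append("-")
--     sanitized = "".join(cleaned).strip("-")
--     return sanitized or None
-- ===== SOURCE B (Python) =====
-- def _sanitize_fragment(fragment):
--     if not fragment:
--         return None
--     chars = fragment.lower()
--
--     def solid(c):
--         return c.isalnum() or c == "_"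
--
--     i = 0
--     while i < len(chars) and not solid(chars[i]):
--         i += 1
--     j = len(chars)
--     while j > i and not solid(chars[j - 1]):
--         j -= 1
--     core = chars[i:j]
--     if not core:
--         return None
--     return "".join(c if solid(c) or c == "-" else "-" for c in core)
-- ===== Notes on version B (the rewrite author's own statement) =====
-- stated objective: alternative
-- what changed: Instead of mapping every character to its replacement and then stripping the resulting dashes (A), B first trims non-alphanumeric/non-underscore characters off both ends of the lowered string with two index scans and only then maps the remaining core, so the strip-after-map pass disappears.
import Mathlib
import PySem

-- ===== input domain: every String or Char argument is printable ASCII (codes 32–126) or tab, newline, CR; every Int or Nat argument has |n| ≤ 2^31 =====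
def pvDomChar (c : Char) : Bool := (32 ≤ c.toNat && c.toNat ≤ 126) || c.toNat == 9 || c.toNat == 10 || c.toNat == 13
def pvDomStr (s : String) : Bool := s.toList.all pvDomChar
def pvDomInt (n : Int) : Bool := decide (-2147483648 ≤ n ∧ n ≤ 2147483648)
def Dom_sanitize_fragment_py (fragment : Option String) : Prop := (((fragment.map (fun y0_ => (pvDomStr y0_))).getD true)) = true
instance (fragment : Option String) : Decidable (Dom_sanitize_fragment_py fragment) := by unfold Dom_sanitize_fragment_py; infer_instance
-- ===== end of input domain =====

-- B trims non-solid (non alnum/underscore) characters off BOTH ENDS of the lowered string first,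
-- then maps the remaining characters, instead of A's map-everything-then-strip-dashes (alternative decomposition).

-- ===== PORT A =====
def sanitize_fragment_py (fragment : Option String) : Option String :=
  match fragment with
  | none => none
  | some f =>
    if f = "" then none
    else
      let cleaned : List Char :=
        (PySem.Chars.lower f.toList).foldl
          (fun acc c =>
            if PySem.Chars.isalnum c || (c = '-' || c = '_') then acc ++ [c]
            else acc ++ ['-'])
          []
      let sanitized := PySem.Chars.stripChars cleaned ['-']
      if sanitized = [] then none else some (String.mk sanitized)

-- ===== PORT B =====
-- 'solid' = character kept by the final strip (alnum or underscore)
def pvSolid (c : Char) : Bool := PySem.Chars.isalnum c || c = '_'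

def sanitize_fragment_py_alt (fragment : Option String) : Option String :=
  match fragment with
  | none => none
  | some f =>
    if f = "" then none
    else
      let chars0 := PySem.Chars.lower f.toList
      -- 'while i < len(chars) and not solid(chars[i]): i += 1' and 'core = chars[i:j]' (front trim)
      let chars1 := chars0.dropWhile (fun c => !pvSolid c)
      -- 'while j > i and not solid(chars[j-1]): j -= 1' (back trim)
      let chars2 := (chars1.reverse.dropWhile (fun c => !pvSolid c)).reverse
      if chars2 = [] then none
      else some (String.mk (chars2.map (fun c => if pvSolid c || c = '-' then c else '-')))

-- ===== PRECONDITION & SPEC =====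
def Spec_sanitize_fragment_py (fragment : Option String) (out : Option String) : Prop := out = sanitize_fragment_py_alt fragment
instance (fragment : Option String) (out : Option String) : Decidable (Spec_sanitize_fragment_py fragment out) := by unfold Spec_sanitize_fragment_py; infer_instance

-- ===== CLAIM (what is proved, stated in full; the proofs are below) =====
def Claim_equal_sanitize_fragment_py : Prop := ∀ (fragment : Option String), Dom_sanitize_fragment_py fragment → Spec_sanitize_fragment_py fragment (sanitize_fragment_py fragment)

-- ===== LEMMAS AND PROOFS =====
-- A's mapping function
def pvG (c : Char) : Char :=
  if PySem.Chars.isalnum c || (c = '-' || c = '_') then c else '-'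

lemma foldl_eq_map_pvG :
    ∀ (l acc : List Char),
      l.foldl
        (fun acc c =>
          if PySem.Chars.isalnum c || (c = '-' || c = '_') then acc ++ [c]
          else acc ++ ['-']) acc = acc ++ l.map pvG := by
  intro l
  induction l with
  | nil => intro acc; simp
  | cons c t ih =>
    intro acc
    simp only [List.foldl, List.map]
    rw [ih]
    by_cases h : PySem.Chars.isalnum c || (c = '-' || c = '_') <;> simp [pvG, h]

-- g c = '-' exactly when c is not solid
lemma pvG_dash_iff (c : Char) : (['-'].contains (pvG c)) = !pvSolid c := by
  unfold pvG pvSolid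
  by_cases h2 : c = '-'
  · subst h2; decide
  · by_cases h3 : c = '_'
    · subst h3; decide
    · by_cases h1 : PySem.Chars.isalnum c <;> simp [h1, h2, h3]

-- B's per-character map agrees with A's on every char
lemma pvG_eq_alt (c : Char) :
    (if pvSolid c || c = '-' then c else '-') = pvG c := by
  unfold pvSolid pvG
  by_cases h1 : PySem.Chars.isalnum c <;> by_cases h2 : c = '-' <;> by_cases h3 : c = '_' <;>
    simp [h1, h2, h3]

lemma strip_map_eq (l : List Char) :
    PySem.Chars.stripChars (l.map pvG) ['-']
    = ((l.dropWhile (fun c => !pvSolid c)).reverse.dropWhile (fun c => !pvSolid c)).reverse.map pvG := by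
  unfold PySem.Chars.stripChars
  show (List.dropWhile (fun c => List.contains ['-'] c)
      (List.dropWhile (fun c => List.contains ['-'] c) (l.map pvG)).reverse).reverse = _
  have hp : (fun c => List.contains ['-'] c) ∘ pvG = (fun c => !pvSolid c) := by
    funext c; exact pvG_dash_iff c
  rw [List.dropWhile_map, hp, ← List.map_reverse, List.dropWhile_map, hp, ← List.map_reverse]

-- ===== VERDICT (by name: the statement is the Claim_ definition above) =====
theorem sanitize_fragment_py_spec : Claim_equal_sanitize_fragment_py := by
  intro fragment _
  unfold Spec_sanitize_fragment_py sanitize_fragment_py sanitize_fragment_py_alt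
  match fragment with
  | none => rfl
  | some f =>
    by_cases hf : f = ""
    · simp [hf]
    · simp only [hf, if_false]
      rw [foldl_eq_map_pvG, List.nil_append, strip_map_eq]
      have hmapfun : (fun c => if pvSolid c || c = '-' then c else '-') = pvG := by
        funext c; exact pvG_eq_alt c
      rw [hmapfun]
      set t := ((PySem.Chars.lower f.toList).dropWhile (fun c => !pvSolid c)).reverse.dropWhile
        (fun c => !pvSolid c) with ht
      by_cases h : t.reverse = []
      · simp [h]
      · have ht0 : t ≠ [] := by intro he; exact h (by simp [he])
        simp [h, ht0]
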